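-- pv_equiv track=rewrite | github.com/eparedes96/Transcriptor4AI | src/transcriptor4ai/core/services/registry.py | _filter_canonical_models
-- ===== SOURCE A (Python) =====
-- from typing import Any, Dict, List, Optional
--
-- def _filter_canonical_models(models: Dict[str, Any]) -> Dict[str, Any]:
--     """
--     Filter out regional or infrastructure duplicates.
--
--     Example: If 'gpt-4o' and 'azure/gpt-4o' exist, keep only 'gpt-4o'.
--     """
--     # Infrastructure-heavy providers to watch for duplicates
--     infrastructure_keywords = ("AZURE", "BEDROCK", "VERTEX", "SAGEMAKER")
--
--     clean_catalog: Dict[str, Any] = {}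
--
--     # Group by base name (part after slash)
--     for mid, data in models.items():
--         base_name = mid.split("/")[-1] if "/" in mid else mid
--
--         # If we don't have this base name yet, or the new one is NOT infrastructure
--         if base_name not in clean_catalog:
--             clean_catalog[base_name] = data
--         else:
--             provider = data["provider"]
--             current_is_infra = any(k in clean_catalog[base_name]["provider"] for k in infrastructure_keywords)
--             new_is_infra = any(k in provider for k in infrastructure_keywords)
--
--             # Favor non-infrastructure (original/pure) providers
--             if current_is_infra and not new_is_infra:
--                 clean_catalog[base_name] = data
--
--     return clean_catalog
-- ===== SOURCE B (Python) =====
-- def _filter_canonical_models(models):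
--     """Dedup models by base name, preferring non-infrastructure providers.
--
--     Two-pass decomposition: first group entries by base name, then pick one
--     representative per group.
--     """
--     infrastructure_keywords = ("AZURE", "BEDROCK", "VERTEX", "SAGEMAKER")
--
--     groups = {}
--     for mid, data in models.items():
--         base_name = mid.split("/")[-1] if "/" in mid else mid
--         groups.setdefault(base_name, []).append(data)
--
--     result = {}
--     for base_name, entries in groups.items():
--         if len(entries) == 1:
--             result[base_name] = entries[0]
--         else:
--             chosen = entries[0]
--             for data in entries:
--                 if not any(k in data["provider"] for k in infrastructure_keywords):
--                     chosen = data
--                     break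
--             result[base_name] = chosen
--     return result
-- ===== Notes on version B (the rewrite author's own statement) =====
-- stated objective: alternative
-- what changed: Replaces A's single conditional-overwrite loop over the dict with a two-pass decomposition: first group entries by base name, then pick one representative per group (first non-infrastructure entry, falling back to the group's first entry).
import Mathlib
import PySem

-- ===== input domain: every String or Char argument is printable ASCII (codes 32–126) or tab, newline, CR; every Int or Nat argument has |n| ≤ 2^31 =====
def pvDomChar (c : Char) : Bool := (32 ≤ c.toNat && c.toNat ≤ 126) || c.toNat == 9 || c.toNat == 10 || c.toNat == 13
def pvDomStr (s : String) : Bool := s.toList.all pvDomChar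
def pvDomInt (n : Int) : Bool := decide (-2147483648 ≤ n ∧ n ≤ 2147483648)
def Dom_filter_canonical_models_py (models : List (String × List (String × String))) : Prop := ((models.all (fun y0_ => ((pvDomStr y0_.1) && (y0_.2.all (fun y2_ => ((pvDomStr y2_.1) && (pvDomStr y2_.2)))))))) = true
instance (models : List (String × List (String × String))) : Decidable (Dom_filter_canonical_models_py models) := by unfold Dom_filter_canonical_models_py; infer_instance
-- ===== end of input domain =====

-- B replaces A's single conditional-overwrite loop by a two-pass decomposition
-- (group by base name, then pick one representative per group); same cost, no speed claim.

-- shared helpers (the same sub-expressions occur verbatim in both Pythons)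
def pvInfraKeywords : List String := ["AZURE", "BEDROCK", "VERTEX", "SAGEMAKER"]

-- mid.split("/")[-1] if "/" in mid else mid   (split("/") is never empty, so [-1] is the last element)
def pvBaseName (mid : String) : String :=
  if PySem.Str.isIn "/" mid then ((PySem.Str.split? mid "/").getD []).getLastD mid else mid

-- any(k in provider for k in infrastructure_keywords)
def pvIsInfra (provider : String) : Bool :=
  pvInfraKeywords.any (fun k => PySem.Str.isIn k provider)

-- data["provider"]; the KeyError case (none) is excluded by Pre_, "" is a harmless default there
def pvProvider (data : List (String × String)) : String :=
  ((PySem.Dict.mk data).get? "provider").getD ""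

-- ===== PORT A =====
def filter_canonical_models_py (models : List (String × List (String × String))) : List (String × List (String × String)) :=
  (models.foldl
    (fun (clean : PySem.Dict String (List (String × String))) md =>
      let base := pvBaseName md.1
      if clean.contains base = false then
        clean.insert base md.2
      else
        let provider := pvProvider md.2
        if pvIsInfra (pvProvider (clean.getD base [])) && !pvIsInfra provider then
          clean.insert base md.2
        else
          clean)
    PySem.Dict.empty).items

-- ===== PORT B =====
def filter_canonical_models_py_alt (models : List (String × List (String × String))) : List (String × List (String × String)) :=
  -- first pass: groups.setdefault(base_name, []).append(data)
  let groups : PySem.Dict String (List (List (String × String))) :=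
    models.foldl (fun g md => g.modify (pvBaseName md.1) [] (· ++ [md.2])) PySem.Dict.empty
  -- second pass: pick one representative per base name
  (groups.items.foldl
    (fun (result : PySem.Dict String (List (String × String))) be =>
      match be.2 with
      | [d] => result.insert be.1 d
      | entries =>
        result.insert be.1
          ((entries.find? (fun d => !pvIsInfra (pvProvider d))).getD (entries.headD [])))
    PySem.Dict.empty).items

-- ===== PRECONDITION & SPEC =====
-- Pre_ excludes exactly the inputs where Python A raises KeyError: an entry whose base name
-- occurs more than once while its data dict has no "provider" key.
def Pre_filter_canonical_models_py (models : List (String × List (String × String))) : Prop :=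
  ∀ p ∈ models,
    1 < models.countP (fun q => pvBaseName q.1 == pvBaseName p.1) →
    (PySem.Dict.mk p.2).contains "provider" = true
instance (models : List (String × List (String × String))) : Decidable (Pre_filter_canonical_models_py models) := by unfold Pre_filter_canonical_models_py; infer_instance

def pvWitness_filter_canonical_models_py : (List (String × List (String × String))) :=
  [("gpt-4o", [("provider", "openai")]), ("azure/gpt-4o", [("provider", "AZURE eu")])]

def Spec_filter_canonical_models_py (models : List (String × List (String × String))) (out : List (String × List (String × String))) : Prop := out = filter_canonical_models_py_alt models
instance (models : List (String × List (String × String))) (out : List (String × List (String × String))) : Decidable (Spec_filter_canonical_models_py models out) := by unfold Spec_filter_canonical_models_py; infer_instance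

-- ===== CLAIM (what is proved, stated in full; the proofs are below) =====
def Claim_equal_filter_canonical_models_py : Prop := ∀ (models : List (String × List (String × String))), Dom_filter_canonical_models_py models → Pre_filter_canonical_models_py models → Spec_filter_canonical_models_py models (filter_canonical_models_py models)

-- ===== LEMMAS AND PROOFS =====

-- the per-group selection B's second pass performs
def pvPick (entries : List (List (String × String))) : List (String × String) :=
  (entries.find? (fun d => !pvIsInfra (pvProvider d))).getD (entries.headD [])

theorem pvPick_singleton (d : List (String × String)) : pvPick [d] = d := by
  unfold pvPick
  cases h : (!pvIsInfra (pvProvider d)) <;> simp [List.find?, h]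

theorem pvPick_append (v : List (List (String × String))) (d : List (String × String)) (hv : v ≠ []) :
    pvPick (v ++ [d]) =
      if pvIsInfra (pvProvider (pvPick v)) && !pvIsInfra (pvProvider d) then d else pvPick v := by
  obtain ⟨a, t, rfl⟩ : ∃ a t, v = a :: t := by
    cases v with
    | nil => exact absurd rfl hv
    | cons a t => exact ⟨a, t, rfl⟩
  unfold pvPick
  rw [List.find?_append]
  cases hf : (a :: t).find? (fun d => !pvIsInfra (pvProvider d)) with
  | some w =>
    have hw' : pvIsInfra (pvProvider w) = false := by
      simpa using List.find?_some (p := fun d => !pvIsInfra (pvProvider d)) hf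
    simp [hw']
  | none =>
    have ha : pvIsInfra (pvProvider a) = true := by
      simpa using List.find?_eq_none.mp hf a (by simp)

    cases hd : pvIsInfra (pvProvider d) with
    | true => simp [List.find?, hd, ha]
    | false => simp [List.find?, hd, ha]

-- invariant relating A's accumulator to B's first-pass accumulator
def pvR (clean : PySem.Dict String (List (String × String)))
    (g : PySem.Dict String (List (List (String × String)))) : Prop :=
  clean.items = g.items.map (fun kv => (kv.1, pvPick kv.2)) ∧
  (∀ kv ∈ g.items, kv.2 ≠ []) ∧ g.keys.Nodup

theorem pvR_step (clean : PySem.Dict String (List (String × String)))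
    (g : PySem.Dict String (List (List (String × String))))
    (md : String × List (String × String)) (h : pvR clean g) :
    pvR
      (let base := pvBaseName md.1
       if clean.contains base = false then clean.insert base md.2
       else
         let provider := pvProvider md.2
         if pvIsInfra (pvProvider (clean.getD base [])) && !pvIsInfra provider then
           clean.insert base md.2
         else clean)
      (g.modify (pvBaseName md.1) [] (· ++ [md.2])) := by
  obtain ⟨h1, h2, h3⟩ := h
  simp only [PySem.Dict.modify]
  have hc : clean.contains (pvBaseName md.1) = g.contains (pvBaseName md.1) := by
    simp only [PySem.Dict.contains, h1, List.any_map]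
    rfl
  cases hcb : g.contains (pvBaseName md.1) with
  | false =>
    have hcc : clean.contains (pvBaseName md.1) = false := hc.trans hcb
    have hgd : g.getD (pvBaseName md.1) [] = [] := PySem.Dict.getD_of_not_contains g [] hcb
    rw [if_pos hcc, hgd, List.nil_append]
    refine ⟨?_, ?_, ?_⟩
    · rw [PySem.Dict.items_insert_of_not_contains _ _ hcc,
          PySem.Dict.items_insert_of_not_contains _ _ hcb, h1]
      simp [pvPick_singleton]
    · intro kv hkv
      rw [PySem.Dict.items_insert_of_not_contains _ _ hcb] at hkv
      rcases List.mem_append.mp hkv with h' | h'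
      · exact h2 kv h'
      · simp only [List.mem_singleton] at h'
        subst h'
        simp
    · exact PySem.Dict.nodup_keys_insert g _ _ h3
  | true =>
    have hcc : clean.contains (pvBaseName md.1) = true := hc.trans hcb
    obtain ⟨v, hv⟩ : ∃ v, g.get? (pvBaseName md.1) = some v := by
      have hs : (g.get? (pvBaseName md.1)).isSome = true := by
        rw [← PySem.Dict.contains_eq_isSome_get?]; exact hcb
      exact Option.isSome_iff_exists.mp hs
    have hvmem : (pvBaseName md.1, v) ∈ g.items := PySem.Dict.mem_items_of_get?_eq_some g hv
    have hvne : v ≠ [] := h2 _ hvmem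
    have hgd : g.getD (pvBaseName md.1) [] = v := PySem.Dict.getD_of_get?_eq_some g [] hv
    have huniq : ∀ kv ∈ g.items, (kv.1 == pvBaseName md.1) = true → kv.2 = v := by
      intro kv hkv hb
      have hk : kv.1 = pvBaseName md.1 := by simpa using hb
      have hsome : g.get? (pvBaseName md.1) = some kv.2 :=
        (PySem.Dict.get?_eq_some_iff_mem_items g _ kv.2 h3).mpr (by rw [← hk]; exact hkv)
      rw [hv] at hsome
      exact (Option.some_inj.mp hsome).symm
    have hcg : clean.getD (pvBaseName md.1) [] = pvPick v := by
      cases hfind : g.items.find? (fun p => p.1 == pvBaseName md.1) with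
      | none => simp [PySem.Dict.get?, hfind] at hv
      | some p =>
        have hp2 : p.2 = v := by simpa [PySem.Dict.get?, hfind] using hv
        have hget : clean.get? (pvBaseName md.1) = some (pvPick v) := by
          simp only [PySem.Dict.get?, h1, List.find?_map]
          rw [show ((fun p : String × List (String × String) => p.1 == pvBaseName md.1) ∘
                (fun kv : String × List (List (String × String)) => (kv.1, pvPick kv.2))) =
              (fun p : String × List (List (String × String)) => p.1 == pvBaseName md.1) from rfl,
            hfind]
          simp [hp2]
        simp [PySem.Dict.getD, hget]
    rw [if_neg (by simp [hcc]), hgd, hcg]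
    have hpa := pvPick_append v md.2 hvne
    cases hC : (pvIsInfra (pvProvider (pvPick v)) && !pvIsInfra (pvProvider md.2)) with
    | true =>
      rw [hC] at hpa
      simp only [if_true] at hpa
      rw [if_pos rfl]
      refine ⟨?_, ?_, ?_⟩
      · rw [PySem.Dict.items_insert_of_contains _ _ hcc,
            PySem.Dict.items_insert_of_contains _ _ hcb, h1, List.map_map, List.map_map]
        refine List.map_congr_left ?_
        intro kv hkv
        by_cases hb : (kv.1 == pvBaseName md.1) = true
        · simp only [Function.comp, hb, if_pos]
          simp [hpa]
        · simp [Function.comp, hb]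
      · intro kv hkv
        rw [PySem.Dict.items_insert_of_contains _ _ hcb] at hkv
        obtain ⟨p, hp, rfl⟩ := List.mem_map.mp hkv
        by_cases hb : (p.1 == pvBaseName md.1) = true
        · simp [hb]
        · simpa [hb] using h2 p hp
      · exact PySem.Dict.nodup_keys_insert g _ _ h3
    | false =>
      rw [hC] at hpa
      simp only [Bool.false_eq_true, if_false] at hpa
      rw [if_neg (by simp)]
      refine ⟨?_, ?_, ?_⟩
      · rw [PySem.Dict.items_insert_of_contains _ _ hcb, h1, List.map_map]
        refine List.map_congr_left ?_
        intro kv hkv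
        by_cases hb : (kv.1 == pvBaseName md.1) = true
        · have hk : kv.1 = pvBaseName md.1 := by simpa using hb
          simp only [Function.comp, hb, if_pos]
          simp [huniq kv hkv hb, hpa, hk]
        · simp [Function.comp, hb]
      · intro kv hkv
        rw [PySem.Dict.items_insert_of_contains _ _ hcb] at hkv
        obtain ⟨p, hp, rfl⟩ := List.mem_map.mp hkv
        by_cases hb : (p.1 == pvBaseName md.1) = true
        · simp [hb]
        · simpa [hb] using h2 p hp
      · exact PySem.Dict.nodup_keys_insert g _ _ h3

theorem pvR_foldl (l : List (String × List (String × String)))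
    (clean : PySem.Dict String (List (String × String)))
    (g : PySem.Dict String (List (List (String × String)))) (h : pvR clean g) :
    pvR
      (l.foldl
        (fun clean md =>
          let base := pvBaseName md.1
          if clean.contains base = false then clean.insert base md.2
          else
            let provider := pvProvider md.2
            if pvIsInfra (pvProvider (clean.getD base [])) && !pvIsInfra provider then
              clean.insert base md.2
            else clean)
        clean)
      (l.foldl (fun g md => g.modify (pvBaseName md.1) [] (· ++ [md.2])) g) := by
  induction l generalizing clean g with
  | nil => exact h
  | cons md t ih => exact ih _ _ (pvR_step clean g md h)

theorem pvMatch_step_eq (result : PySem.Dict String (List (String × String)))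
    (be : String × List (List (String × String))) :
    (match be.2 with
     | [d] => result.insert be.1 d
     | entries =>
       result.insert be.1
         ((entries.find? (fun d => !pvIsInfra (pvProvider d))).getD (entries.headD []))) =
    result.insert be.1 (pvPick be.2) := by
  obtain ⟨k, entries⟩ := be
  match entries with
  | [] => rfl
  | [d] => simp [pvPick_singleton]
  | a :: b :: t => rfl

-- ===== VERDICT (by name: the statement is the Claim_ definition above) =====
theorem filter_canonical_models_py_spec : Claim_equal_filter_canonical_models_py := by
  intro models _ _
  unfold Spec_filter_canonical_models_py filter_canonical_models_py filter_canonical_models_py_alt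
  have h0 : pvR PySem.Dict.empty PySem.Dict.empty := by
    refine ⟨rfl, ?_, ?_⟩ <;> simp [PySem.Dict.empty, PySem.Dict.keys]
  obtain ⟨h1, h2, h3⟩ := pvR_foldl models PySem.Dict.empty PySem.Dict.empty h0
  simp only [PySem.Dict.keys] at h3
  rw [h1]
  have hfun :
      (fun (result : PySem.Dict String (List (String × String)))
           (be : String × List (List (String × String))) =>
        match be.2 with
        | [d] => result.insert be.1 d
        | entries =>
          result.insert be.1
            ((entries.find? (fun d => !pvIsInfra (pvProvider d))).getD (entries.headD []))) =
      (fun result be => result.insert be.1 (pvPick be.2)) :=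
    funext fun r => funext fun be => pvMatch_step_eq r be
  rw [hfun]
  rw [PySem.Dict.items_foldl_insert_fresh
        (List.foldl (fun g md => g.modify (pvBaseName md.1) [] (· ++ [md.2]))
          PySem.Dict.empty models).items
        (fun x => x.1) (fun x => pvPick x.2) PySem.Dict.empty (fun a _ => rfl) h3]
  simp [PySem.Dict.empty]
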